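-- pv_equiv track=rewrite | github.com/bahadir-bakla/musicmath | scripts/brute_force_patterns.py | p81_kural_30
-- ===== SOURCE A (Python) =====
-- def p81_kural_30(n, width=20):
--     """Wolfram Kural 30 (kaotik hücresel otomat)
--     Armoni: Deterministik kaos → pseudo-random melodi"""
--     state = [0] * width
--     state[width // 2] = 1
--     rule = 30
--     for _ in range(n):
--         yield sum(state)  # toplam aktif hücre = şiddet
--         new_state = []
--         for i in range(width):
--             left = state[(i - 1) % width]
--             center = state[i]
--             right = state[(i + 1) % width]
--             pattern = (left << 2) | (center << 1) | right
--             new_state.append((rule >> pattern) & 1)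
--         state = new_state
-- ===== SOURCE B (Python) =====
-- def p81_kural_30(n, width=20):
--     """Wolfram Kural 30 over a single integer bitmask: bit i of `state` is
--     cell i; each step updates the whole row at once with shifts/mask
--     (circular wraparound) via Rule 30's closed form left ^ (center | right),
--     and yields the popcount of the mask."""
--     state = 1 << (width // 2)
--     mask = (1 << width) - 1
--     for _ in range(n):
--         yield state.bit_count()
--         left = ((state << 1) | (state >> (width - 1))) & mask
--         right = ((state >> 1) | (state << (width - 1))) & mask
--         state = left ^ (state | right)
-- ===== Notes on version B (the rewrite author's own statement) =====
-- stated objective: faster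
-- what changed: The row of cells becomes a single integer bitmask: each step updates all cells at once via shifts, wraparound masking and the closed form left ^ (state | right), and the per-step yield is the mask's popcount instead of summing a list; the per-cell inner loop with modular indexing and the rule bit-table disappears.
import Mathlib
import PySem

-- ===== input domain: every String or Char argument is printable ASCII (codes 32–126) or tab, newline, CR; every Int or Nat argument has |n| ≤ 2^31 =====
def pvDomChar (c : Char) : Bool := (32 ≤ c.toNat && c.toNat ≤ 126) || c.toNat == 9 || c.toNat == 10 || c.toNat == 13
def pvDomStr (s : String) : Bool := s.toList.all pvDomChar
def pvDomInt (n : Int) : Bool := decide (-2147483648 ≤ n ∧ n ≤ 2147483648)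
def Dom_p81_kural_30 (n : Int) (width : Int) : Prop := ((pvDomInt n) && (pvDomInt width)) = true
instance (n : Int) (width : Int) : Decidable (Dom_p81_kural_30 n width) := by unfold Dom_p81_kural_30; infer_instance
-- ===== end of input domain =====

-- B replaces A's list-of-cells row and per-cell inner loop by a single integer bitmask updated
-- whole-row with shifts and wraparound masking, yielding the mask's popcount each step (faster by a constant factor in Python).

-- ===== PORT A =====
-- one automaton step: new_state built cell by cell from the rule's bit table
def pvStepA (width : Int) (state : List Int) : List Int :=
  (List.range width.toNat).map (fun (i : Nat) =>
    let left := (PySem.List.pyGet? state (PySem.Int.mod ((i : Int) - 1) width)).getD 0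
    let center := (PySem.List.pyGet? state (i : Int)).getD 0
    let right := (PySem.List.pyGet? state (PySem.Int.mod ((i : Int) + 1) width)).getD 0
    let pattern := PySem.Int.bor (PySem.Int.bor (left <<< (2 : Nat)) (center <<< (1 : Nat))) right
    -- shift amount: pattern is built from 0/1 cells, hence a nonnegative Int; Python would raise on a negative shift
    PySem.Int.band ((30 : Int) >>> pattern.toNat) 1)

-- the generator's n yields, collected in order
def pvLoopA (width : Int) : Nat → List Int → List Int
  | 0, _ => []
  | k + 1, state => state.sum :: pvLoopA width k (pvStepA width state)

def p81_kural_30 (n : Int) (width : Int) : List Int :=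
  -- state[width // 2] = 1 : under Pre_ (1 ≤ width) the index width // 2 is nonnegative and in range
  let state := (List.replicate width.toNat 0).set (PySem.Int.floordiv width 2).toNat 1
  pvLoopA width n.toNat state

-- ===== PORT B =====
-- one bitmask step: whole-row update via shifted copies; shift amount width-1 is the
-- nonnegative int width-1 under Pre_ (1 ≤ width), so .toNat is exact
def pvStepB (width : Int) (mask : Int) (state : Int) : Int :=
  let left := PySem.Int.band (PySem.Int.bor (state <<< (1 : Nat)) (state >>> (width - 1).toNat)) mask
  let right := PySem.Int.band (PySem.Int.bor (state >>> (1 : Nat)) (state <<< (width - 1).toNat)) mask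
  PySem.Int.bxor left (PySem.Int.bor state right)

-- the generator's n yields: popcount of the mask each step
def pvLoopB (width : Int) (mask : Int) : Nat → Int → List Int
  | 0, _ => []
  | k + 1, state => (PySem.Int.bitCount state : Int) :: pvLoopB width mask k (pvStepB width mask state)

def p81_kural_30_alt (n : Int) (width : Int) : List Int :=
  -- 1 << (width // 2) and (1 << width) - 1 : under Pre_ (1 ≤ width) both shift amounts are
  -- the nonnegative ints width//2 and width, so .toNat is exact
  let state : Int := (1 : Int) <<< (PySem.Int.floordiv width 2).toNat
  let mask : Int := ((1 : Int) <<< width.toNat) - 1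
  pvLoopB width mask n.toNat state

-- ===== PRECONDITION & SPEC =====
-- Pre_ excludes width ≤ 0, where A raises IndexError on state[width // 2] (the row is empty)
-- and B raises ValueError on a negative shift (width = 0 included: state >> (width-1) = state >> -1).
def Pre_p81_kural_30 (n : Int) (width : Int) : Prop := 1 ≤ width
instance (n : Int) (width : Int) : Decidable (Pre_p81_kural_30 n width) := by unfold Pre_p81_kural_30; infer_instance
def pvWitness_p81_kural_30 : Int × Int := (3, 5)

def Spec_p81_kural_30 (n : Int) (width : Int) (out : List Int) : Prop := out = p81_kural_30_alt n width
instance (n : Int) (width : Int) (out : List Int) : Decidable (Spec_p81_kural_30 n width out) := by unfold Spec_p81_kural_30; infer_instance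

-- ===== CLAIM (what is proved, stated in full; the proofs are below) =====
def Claim_equal_p81_kural_30 : Prop := ∀ (n : Int) (width : Int), Dom_p81_kural_30 n width → Pre_p81_kural_30 n width → Spec_p81_kural_30 n width (p81_kural_30 n width)

-- ===== LEMMAS AND PROOFS =====

-- encoding of A's row as B's bitmask: bit i = cell i
def pvEnc (s : List Int) : Nat := s.foldr (fun x m => x.toNat + 2 * m) 0

-- the Nat-level value of one B step (pvStepB on casts computes exactly this)
def pvNStep (w : Nat) (m : Nat) : Nat :=
  let mask := 2 ^ w - 1
  (((m <<< 1) ||| (m >>> (w - 1))) &&& mask) ^^^ (m ||| (((m >>> 1) ||| (m <<< (w - 1))) &&& mask))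

-- A's per-cell rule-table value, named for the proofs
def pvCellA (l c r : Int) : Int :=
  PySem.Int.band ((30 : Int) >>> (PySem.Int.bor (PySem.Int.bor (l <<< (2 : Nat)) (c <<< (1 : Nat))) r).toNat) 1

-- invariant: the row has length w and all cells are 0 or 1
def pvInv (w : Nat) (s : List Int) : Prop := s.length = w ∧ ∀ x ∈ s, x = 0 ∨ x = 1

lemma pvEnc_cons (x : Int) (t : List Int) : pvEnc (x :: t) = x.toNat + 2 * pvEnc t := rfl

lemma pvEnc_testBit (s : List Int) (hb : ∀ x ∈ s, x = 0 ∨ x = 1) (i : Nat) :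
    (pvEnc s).testBit i = decide (s.getD i 0 = 1) := by
  induction s generalizing i with
  | nil => simp [pvEnc]
  | cons x t ih =>
    have hx := hb x (by simp)
    have ht : ∀ y ∈ t, y = 0 ∨ y = 1 := fun y hy => hb y (by simp [hy])
    have hxn : x.toNat ≤ 1 := by rcases hx with rfl | rfl <;> decide
    cases i with
    | zero =>
      rw [Nat.testBit_zero, pvEnc_cons, List.getD_cons_zero]
      have h2 : (x.toNat + 2 * pvEnc t) % 2 = x.toNat := by omega
      rw [h2]
      rcases hx with rfl | rfl <;> decide
    | succ i =>
      rw [Nat.testBit_add_one, pvEnc_cons, List.getD_cons_succ]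
      have h2 : (x.toNat + 2 * pvEnc t) / 2 = pvEnc t := by omega
      rw [h2]
      exact ih ht i

lemma pvEnc_lt (s : List Int) (hb : ∀ x ∈ s, x = 0 ∨ x = 1) : pvEnc s < 2 ^ s.length := by
  induction s with
  | nil => simp [pvEnc]
  | cons x t ih =>
    have hx := hb x (by simp)
    have hxn : x.toNat ≤ 1 := by rcases hx with rfl | rfl <;> decide
    have ht := ih (fun y hy => hb y (by simp [hy]))
    rw [pvEnc_cons, List.length_cons, pow_succ]
    omega

lemma pvEnc_testBit_high (s : List Int) (hb : ∀ x ∈ s, x = 0 ∨ x = 1) (i : Nat)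
    (hi : s.length ≤ i) : (pvEnc s).testBit i = false := by
  refine Nat.testBit_lt_two_pow (lt_of_lt_of_le (pvEnc_lt s hb) ?_)
  exact Nat.pow_le_pow_right (by norm_num) hi

-- pyGet? at a nonnegative in-range index, as a getD
lemma pvGetD_natCast (s : List Int) (j : Nat) :
    (PySem.List.pyGet? s (j : Int)).getD 0 = s.getD j 0 := by
  rw [PySem.List.pyGet?_natCast, List.getD_eq_getElem?_getD]

lemma pvPyGet_mem (s : List Int) (idx : Int) (y : Int)
    (h : PySem.List.pyGet? s idx = some y) : y ∈ s := by
  simp only [PySem.List.pyGet?, PySem.List.pyIdx?] at h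
  split at h
  · split at h
    · simp only [Option.bind_some] at h; exact List.mem_of_getElem? h
    · simp at h
  · split at h
    · simp only [Option.bind_some] at h; exact List.mem_of_getElem? h
    · simp at h

lemma pvGetD01 (s : List Int) (hb : ∀ x ∈ s, x = 0 ∨ x = 1) (idx : Int) :
    (PySem.List.pyGet? s idx).getD 0 = 0 ∨ (PySem.List.pyGet? s idx).getD 0 = 1 := by
  cases h : PySem.List.pyGet? s idx with
  | none => simp
  | some y => simpa using hb y (pvPyGet_mem s idx y h)

-- Python's (i-1) % w for 0 ≤ i < w is the circular left-neighbour index (i + (w-1)) mod w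
lemma pvModLeft (i w : Nat) (hi : i < w) (h1 : 1 ≤ w) :
    PySem.Int.mod ((i : Int) - 1) (w : Int) = (((i + (w - 1)) % w : Nat) : Int) := by
  rw [PySem.Int.mod_eq_emod_of_pos (by omega)]
  rcases Nat.eq_zero_or_pos i with rfl | hip
  · have h2 : ((0 : Nat) : Int) - 1 = ((w - 1 : Nat) : Int) - (w : Int) := by push_cast; omega
    rw [h2, Int.sub_emod_right]
    norm_cast
    simp
  · have h2 : (i : Int) - 1 = ((i - 1 : Nat) : Int) := by push_cast [hip]; omega
    rw [h2]
    norm_cast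
    have h3 : i + (w - 1) = (i - 1) + w := by omega
    rw [h3, Nat.add_mod_right]

lemma pvModRight (i w : Nat) (hw : 0 < w) :
    PySem.Int.mod ((i : Int) + 1) (w : Int) = (((i + 1) % w : Nat) : Int) := by
  rw [PySem.Int.mod_eq_emod_of_pos (by omega)]
  norm_cast

-- the Rule-30 bit-table cell agrees with the closed form left XOR (center OR right), as a bit
lemma pvCellBit (l c r : Int) (hl : l = 0 ∨ l = 1) (hc : c = 0 ∨ c = 1) (hr : r = 0 ∨ r = 1) :
    decide (pvCellA l c r = 1) = (decide (l = 1) ^^ (decide (c = 1) || decide (r = 1))) := by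
  rcases hl with rfl | rfl <;> rcases hc with rfl | rfl <;> rcases hr with rfl | rfl <;> decide

lemma pvCell01 (l c r : Int) (hl : l = 0 ∨ l = 1) (hc : c = 0 ∨ c = 1) (hr : r = 0 ∨ r = 1) :
    pvCellA l c r = 0 ∨ pvCellA l c r = 1 := by
  rcases hl with rfl | rfl <;> rcases hc with rfl | rfl <;> rcases hr with rfl | rfl <;> decide

lemma pvStepA_getD (w : Nat) (s : List Int) (hw : 1 ≤ w) (hl : s.length = w)
    (i : Nat) (hi : i < w) :
    (pvStepA (w : Int) s).getD i 0
      = pvCellA (s.getD ((i + (w - 1)) % w) 0) (s.getD i 0) (s.getD ((i + 1) % w) 0) := by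
  unfold pvStepA
  rw [List.getD_eq_getElem?_getD, List.getElem?_eq_getElem (by simp; omega)]
  simp only [List.getElem_map, List.getElem_range, Int.toNat_natCast, Option.getD_some]
  rw [pvModLeft i w hi hw, pvModRight i w (by omega), pvGetD_natCast, pvGetD_natCast, pvGetD_natCast]
  rfl

lemma pvStepA_inv (w : Nat) (s : List Int) (hinv : pvInv w s) :
    pvInv w (pvStepA (w : Int) s) := by
  obtain ⟨hl, hb⟩ := hinv
  constructor
  · simp [pvStepA]
  · intro x hx
    simp only [pvStepA, Int.toNat_natCast, List.mem_map, List.mem_range] at hx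
    obtain ⟨i, hi, rfl⟩ := hx
    exact pvCell01 _ _ _ (pvGetD01 s hb _) (pvGetD01 s hb _) (pvGetD01 s hb _)

-- main per-step correspondence: encoding A's new row = B's Nat-level mask update
lemma pvStep_enc (w : Nat) (s : List Int) (hw : 1 ≤ w) (hinv : pvInv w s) :
    pvEnc (pvStepA (w : Int) s) = pvNStep w (pvEnc s) := by
  obtain ⟨hl, hb⟩ := hinv
  have hbnew : ∀ x ∈ pvStepA (w : Int) s, x = 0 ∨ x = 1 := (pvStepA_inv w s ⟨hl, hb⟩).2
  have hlen : (pvStepA (w : Int) s).length = w := (pvStepA_inv w s ⟨hl, hb⟩).1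
  have hhi : ∀ j, w ≤ j → (pvEnc s).testBit j = false := fun j hj =>
    pvEnc_testBit_high s hb j (by omega)
  apply Nat.eq_of_testBit_eq
  intro i
  rw [pvEnc_testBit _ hbnew i]
  by_cases hi : i < w
  · -- in-range bit
    have hm01 : ∀ j, s.getD j 0 = 0 ∨ s.getD j 0 = 1 := by
      intro j
      rcases lt_or_ge j s.length with h | h
      · rw [List.getD_eq_getElem?_getD, List.getElem?_eq_getElem h]; exact hb _ (List.getElem_mem _)
      · rw [List.getD_eq_getElem?_getD, List.getElem?_eq_none (by omega)]; simp
    rw [pvStepA_getD w s hw hl i hi, pvCellBit _ _ _ (hm01 _) (hm01 _) (hm01 _)]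
    have hA : ∀ j, decide (s.getD j 0 = 1) = (pvEnc s).testBit j := fun j =>
      (pvEnc_testBit s hb j).symm
    rw [hA, hA, hA]
    unfold pvNStep
    simp only [Nat.testBit_xor, Nat.testBit_or, Nat.testBit_and, Nat.testBit_shiftLeft,
      Nat.testBit_shiftRight, Nat.testBit_two_pow_sub_one]
    have hmaskb : decide (i < w) = true := by simp [hi]
    rw [hmaskb]
    simp only [Bool.and_true]
    congr 1
    · -- left neighbour bit
      rcases Nat.eq_zero_or_pos i with rfl | hip
      · have e1 : (0 + (w - 1)) % w = w - 1 := by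
          rw [Nat.zero_add]; exact Nat.mod_eq_of_lt (by omega)
        have e2 : decide ((1:Nat) ≤ (0:Nat)) = false := by decide
        rw [e1, e2]
        simp
      · have e1 : (i + (w - 1)) % w = i - 1 := by
          have h3 : i + (w - 1) = (i - 1) + w := by omega
          rw [h3, Nat.add_mod_right]
          exact Nat.mod_eq_of_lt (by omega)
        have e2 : decide (1 ≤ i) = true := by simp; omega
        rw [e1, e2, hhi (w - 1 + i) (by omega)]
        simp
    · -- center || right neighbour bit
      congr 1
      by_cases hlast : i = w - 1
      · subst hlast
        have e1 : (w - 1 + 1) % w = 0 := by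
          have h4 : w - 1 + 1 = w := by omega
          rw [h4, Nat.mod_self]
        have e2 : decide (w - 1 ≤ w - 1) = true := by simp
        rw [e1, e2, hhi (1 + (w - 1)) (by omega)]
        simp
      · have e1 : (i + 1) % w = i + 1 := Nat.mod_eq_of_lt (by omega)
        have e2 : decide (w - 1 ≤ i) = false := by simp; omega
        rw [e1, e2, Nat.add_comm 1 i]
        simp
  · -- bits above the row are zero on both sides
    rw [List.getD_eq_getElem?_getD, List.getElem?_eq_none (by omega)]
    simp only [Option.getD_none]
    unfold pvNStep
    simp only [Nat.testBit_xor, Nat.testBit_or, Nat.testBit_and, Nat.testBit_shiftLeft,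
      Nat.testBit_shiftRight, Nat.testBit_two_pow_sub_one]
    have hmaskb : decide (i < w) = false := by simp [hi]
    rw [hmaskb, hhi i (by omega)]
    simp

-- pvStepB on casts computes the Nat-level step
lemma pvStepB_cast (width : Int) (hw : 1 ≤ width) (m : Nat) :
    pvStepB width (((1 : Int) <<< width.toNat) - 1) ((m : Nat) : Int)
      = ((pvNStep width.toNat m : Nat) : Int) := by
  have hmask : ((1 : Int) <<< width.toNat) - 1 = ((2 ^ width.toNat - 1 : Nat) : Int) := by
    have h1 : ((1 : Int) <<< width.toNat) = (((1 <<< width.toNat : Nat) : Int)) := rfl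
    rw [h1, Nat.one_shiftLeft]
    have h2 : (1:Nat) ≤ 2 ^ width.toNat := Nat.one_le_two_pow
    push_cast [h2]
    ring
  have hsub : (width - 1).toNat = width.toNat - 1 := by omega
  unfold pvStepB pvNStep
  rw [hmask, hsub]
  have hSL : ∀ (a k : Nat), ((a : Int) <<< k) = ((a <<< k : Nat) : Int) := fun a k => rfl
  have hSR : ∀ (a k : Nat), ((a : Int) >>> k) = ((a >>> k : Nat) : Int) := fun a k => rfl
  rw [hSL, hSR, hSR, hSL]
  simp only [PySem.Int.bor_natCast, PySem.Int.band_natCast, PySem.Int.bxor_natCast]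

-- popcount of the encoding = A's sum of cells
lemma pvBitCount_step (a m : Nat) (ha : a ≤ 1) :
    PySem.Int.bitCount ((a + 2 * m : Nat) : Int) = a + PySem.Int.bitCount ((m : Nat) : Int) := by
  rcases Nat.eq_zero_or_pos (a + 2 * m) with h0 | hp
  · have ha0 : a = 0 := by omega
    have hm0 : m = 0 := by omega
    subst ha0; subst hm0
    simp [PySem.Int.bitCount_zero]
  · rw [PySem.Int.bitCount_natCast hp]
    have h1 : (a + 2 * m) % 2 = a := by omega
    have h2 : (a + 2 * m) / 2 = m := by omega
    rw [h1, h2]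

lemma pvBitCount_enc (s : List Int) (hb : ∀ x ∈ s, x = 0 ∨ x = 1) :
    ((PySem.Int.bitCount ((pvEnc s : Nat) : Int)) : Int) = s.sum := by
  induction s with
  | nil => simp [pvEnc, PySem.Int.bitCount_zero]
  | cons x t ih =>
    have hx := hb x (by simp)
    have ht : ∀ y ∈ t, y = 0 ∨ y = 1 := fun y hy => hb y (by simp [hy])
    have hxn : x.toNat ≤ 1 := by rcases hx with rfl | rfl <;> decide
    rw [pvEnc_cons, pvBitCount_step x.toNat (pvEnc t) hxn, List.sum_cons]
    have hxx : ((x.toNat : Nat) : Int) = x := by rcases hx with rfl | rfl <;> decide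
    push_cast
    rw [ih ht, hxx]

-- the loops agree step for step under the invariant
lemma pvLoop_eq (width : Int) (hw : 1 ≤ width) (k : Nat) (s : List Int)
    (hinv : pvInv width.toNat s) :
    pvLoopA width k s
      = pvLoopB width (((1 : Int) <<< width.toNat) - 1) k ((pvEnc s : Nat) : Int) := by
  induction k generalizing s with
  | zero => rfl
  | succ k ih =>
    have hwc : ((width.toNat : Int)) = width := Int.toNat_of_nonneg (by omega)
    have hinv' : pvInv width.toNat (pvStepA width s) := by
      rw [← hwc]; exact pvStepA_inv width.toNat s hinv
    have henc : pvEnc (pvStepA width s) = pvNStep width.toNat (pvEnc s) := by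
      rw [← hwc]; exact pvStep_enc width.toNat s (by omega) hinv
    have hstep : pvStepB width (((1 : Int) <<< width.toNat) - 1) ((pvEnc s : Nat) : Int)
        = ((pvEnc (pvStepA width s) : Nat) : Int) := by
      rw [pvStepB_cast width hw, henc]
    simp only [pvLoopA, pvLoopB]
    rw [← pvBitCount_enc s hinv.2, hstep, ih _ hinv']

-- the initial row encodes to B's initial mask 1 << (width // 2)
lemma pvEnc_replicate_zero (w : Nat) : pvEnc (List.replicate w (0:Int)) = 0 := by
  induction w with
  | zero => rfl
  | succ w ihw => simp [List.replicate_succ, pvEnc_cons, ihw]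

lemma pvEnc_init_aux (w j : Nat) (hj : j < w) :
    pvEnc ((List.replicate w 0).set j 1) = 2 ^ j := by
  induction w generalizing j with
  | zero => omega
  | succ w ih =>
    cases j with
    | zero =>
      simp [List.replicate_succ, pvEnc_cons, pvEnc_replicate_zero]
    | succ j =>
      have h1 : ((0:Int) :: List.replicate w 0).set (j+1) 1
          = (0:Int) :: (List.replicate w 0).set j 1 := by simp [List.set]
      rw [List.replicate_succ, h1, pvEnc_cons, ih j (by omega), pow_succ]
      simp [Nat.mul_comm]

lemma pvInit_inv (width : Int) :
    pvInv width.toNat ((List.replicate width.toNat 0).set (PySem.Int.floordiv width 2).toNat 1) := by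
  constructor
  · simp
  · intro x hx
    rcases List.mem_or_eq_of_mem_set hx with h | h
    · left; exact List.eq_of_mem_replicate h
    · right; exact h

lemma pvHalf_lt (width : Int) (hw : 1 ≤ width) :
    (PySem.Int.floordiv width 2).toNat < width.toNat := by
  rw [PySem.Int.floordiv_eq_ediv_of_pos (by norm_num)]
  omega

-- ===== VERDICT (by name: the statement is the Claim_ definition above) =====
theorem p81_kural_30_spec : Claim_equal_p81_kural_30 := by
  intro n width _ hpre
  unfold Spec_p81_kural_30 p81_kural_30 p81_kural_30_alt
  rw [pvLoop_eq width hpre n.toNat _ (pvInit_inv width),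
      pvEnc_init_aux width.toNat (PySem.Int.floordiv width 2).toNat (pvHalf_lt width hpre)]
  have h1 : ((1 : Int) <<< (PySem.Int.floordiv width 2).toNat)
      = (((1 <<< (PySem.Int.floordiv width 2).toNat : Nat) : Int)) := rfl
  rw [h1, Nat.one_shiftLeft]
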